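-- pv_equiv track=rewrite | github.com/FilipeHuang/IP24-25 | IP081.py | sort_initials
-- ===== SOURCE A (Python) =====
-- def sort_initials(text):
--     a = {}
--     for i in text.split():
--         c = i[0].lower()
--         if c in a: a[c]+=1
--         else: a[c]=1
--     #elements of lst are in a tuple of 2 elements
--     lst =[(k,v) for k,v in a.items()]
--     #reverse the order by the number of the second element
--     #then order it again with the 1st (the letter)
--     lst.sort(key = lambda x : (-x[1],x[0]))
--     return "".join(k[0] for k in lst)
-- ===== SOURCE B (Python) =====
-- def sort_initials(text):
--     counts = {}
--     words = text.split()
--     for w in words: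
--         c = w[0].lower()
--         counts[c] = counts.get(c, 0) + 1
--     out = []
--     for n in range(len(words), 0, -1):
--         out.extend(sorted(c for c, v in counts.items() if v == n))
--     return "".join(out)
-- ===== Notes on version B (the rewrite author's own statement) =====
-- stated objective: alternative
-- what changed: Replaces the comparison sort on (-count, letter) key tuples by a bucket pass: frequencies are scanned from the word count down to 1 and the alphabetically sorted letters of each frequency bucket are appended.
import Mathlib
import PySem

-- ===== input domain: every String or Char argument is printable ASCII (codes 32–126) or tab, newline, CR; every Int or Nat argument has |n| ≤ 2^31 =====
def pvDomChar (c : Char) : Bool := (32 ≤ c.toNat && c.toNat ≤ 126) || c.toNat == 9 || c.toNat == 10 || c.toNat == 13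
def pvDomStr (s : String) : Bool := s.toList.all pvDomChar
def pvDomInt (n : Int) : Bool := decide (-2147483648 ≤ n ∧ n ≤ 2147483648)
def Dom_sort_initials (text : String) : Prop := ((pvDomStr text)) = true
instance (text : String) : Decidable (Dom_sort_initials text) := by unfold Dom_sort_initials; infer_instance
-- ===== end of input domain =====

-- B replaces A's comparison sort on (-count, letter) tuples by a bucket pass over frequencies
-- from the word count down to 1 (objective: alternative algorithm, similar cost).

-- ===== PORT A =====
-- exact: each word from split() is nonempty, so i[0] is its first char ([]-branch unreachable);
-- str.lower of a single ASCII char is Chars.lowerChar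
def sort_initials (text : String) : String :=
  String.ofList
    ((PySem.List.sorted2
        ((PySem.Chars.split₀ text.toList).foldl
          (fun d i =>
            match i with
            | [] => d
            | ch :: _ =>
              if d.contains (PySem.Chars.lowerChar ch) then
                d.insert (PySem.Chars.lowerChar ch) (d.getD (PySem.Chars.lowerChar ch) 0 + 1)
              else
                d.insert (PySem.Chars.lowerChar ch) 1)
          (PySem.Dict.empty : PySem.Dict Char Int)).items
        (fun x => -x.2) (fun x => x.1)).map (fun k => k.1))

-- ===== PORT B =====
def sort_initials_alt (text : String) : String :=
  String.ofList
    ((PySem.List.pyRange (((PySem.Chars.split₀ text.toList).length : Int)) 0 (-1)).foldl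
      (fun acc n =>
        acc ++ PySem.List.sorted
          ((((PySem.Chars.split₀ text.toList).foldl
              (fun d w =>
                match w with
                | [] => d
                | ch :: _ => d.insert (PySem.Chars.lowerChar ch)
                    (d.getD (PySem.Chars.lowerChar ch) 0 + 1))
              (PySem.Dict.empty : PySem.Dict Char Int)).items.filter
            (fun p => p.2 == n)).map (fun p => p.1))
          (fun x => x))
      [])

-- ===== PRECONDITION & SPEC =====
def Spec_sort_initials (text : String) (out : String) : Prop := out = sort_initials_alt text
instance (text : String) (out : String) : Decidable (Spec_sort_initials text out) := by unfold Spec_sort_initials; infer_instance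

-- ===== CLAIM (what is proved, stated in full; the proofs are below) =====
def Claim_equal_sort_initials : Prop := ∀ (text : String), Dom_sort_initials text → Spec_sort_initials text (sort_initials text)

-- ===== LEMMAS AND PROOFS =====

theorem insertBy_cons {α : Type} (b : α → α → Bool) (x y : α) (ys : List α) :
    PySem.List.insertBy b x (y :: ys) =
      if b x y then x :: y :: ys else y :: PySem.List.insertBy b x ys := rfl

-- both counting loops compute the running fold of insert (getD + 1) over the lowercased first letters
theorem foldA_eq (ws : List (List Char)) (d : PySem.Dict Char Int) :
    ws.foldl
      (fun d i =>
        match i with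
        | [] => d
        | ch :: _ =>
          if d.contains (PySem.Chars.lowerChar ch) then
            d.insert (PySem.Chars.lowerChar ch) (d.getD (PySem.Chars.lowerChar ch) 0 + 1)
          else
            d.insert (PySem.Chars.lowerChar ch) 1) d
    = (ws.filterMap (fun w => w.head?.map PySem.Chars.lowerChar)).foldl
        (fun d c => d.insert c (d.getD c 0 + 1)) d := by
  induction ws generalizing d with
  | nil => rfl
  | cons w ws ih =>
    cases w with
    | nil => simpa using ih d
    | cons ch t =>
      have hstep : (if d.contains (PySem.Chars.lowerChar ch) then
            d.insert (PySem.Chars.lowerChar ch) (d.getD (PySem.Chars.lowerChar ch) 0 + 1)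
          else d.insert (PySem.Chars.lowerChar ch) 1)
          = d.insert (PySem.Chars.lowerChar ch) (d.getD (PySem.Chars.lowerChar ch) 0 + 1) := by
        by_cases h : d.contains (PySem.Chars.lowerChar ch) = true
        · simp [h]
        · have h0 : d.get? (PySem.Chars.lowerChar ch) = none :=
            (PySem.Dict.get?_eq_none_iff_contains d _).mpr (by simpa using h)
          simp [h, PySem.Dict.getD, h0]
      simp only [List.foldl_cons, List.filterMap_cons, List.head?_cons, Option.map_some]
      rw [hstep]
      exact ih _

theorem foldB_eq (ws : List (List Char)) (d : PySem.Dict Char Int) :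
    ws.foldl
      (fun d w =>
        match w with
        | [] => d
        | ch :: _ => d.insert (PySem.Chars.lowerChar ch)
            (d.getD (PySem.Chars.lowerChar ch) 0 + 1)) d
    = (ws.filterMap (fun w => w.head?.map PySem.Chars.lowerChar)).foldl
        (fun d c => d.insert c (d.getD c 0 + 1)) d := by
  induction ws generalizing d with
  | nil => rfl
  | cons w ws ih =>
    cases w with
    | nil => simpa using ih d
    | cons ch t => simpa using ih _

theorem before_eq {α : Type} (k1 : α → Int) (k2 : α → Char) (a b : α) :
    (decide (k1 a < k1 b) || (!decide (k1 b < k1 a) && decide (k2 a < k2 b)))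
      = decide ((toLex (k1 a, k2 a) : Lex (Int × Char)) < toLex (k1 b, k2 b)) := by
  rcases lt_trichotomy (k1 a) (k1 b) with h | h | h
  · simp [Prod.Lex.toLex_lt_toLex, h]
  · simp [Prod.Lex.toLex_lt_toLex, h]
  · simp [Prod.Lex.toLex_lt_toLex, h, not_lt_of_gt h, h.ne']

theorem sorted2_eq_sorted_toLex {α : Type} (xs : List α) (k1 : α → Int) (k2 : α → Char) :
    PySem.List.sorted2 xs k1 k2
      = PySem.List.sorted xs (fun a => (toLex (k1 a, k2 a) : Lex (Int × Char))) := by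
  simp only [PySem.List.sorted2, PySem.List.sorted, if_neg (by decide : ¬ (false = true))]
  have h : (fun a b => decide (k1 a < k1 b) || (!decide (k1 b < k1 a) && decide (k2 a < k2 b)))
      = fun a b => decide ((toLex (k1 a, k2 a) : Lex (Int × Char)) < toLex (k1 b, k2 b)) := by
    funext a b; exact before_eq k1 k2 a b
  rw [h]

theorem insertBy_map {α β : Type} (f : α → β) (ba : α → α → Bool) (bb : β → β → Bool)
    (h : ∀ a a', bb (f a) (f a') = ba a a') (x : α) (l : List α) :
    PySem.List.insertBy bb (f x) (l.map f) = (PySem.List.insertBy ba x l).map f := by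
  induction l with
  | nil => rfl
  | cons y ys ih =>
    simp only [List.map_cons, insertBy_cons, h]
    by_cases hb : ba x y = true
    · simp [hb]
    · simp [hb, ih]

-- projecting the letters out of a pair-sort by first component is sorting the letters
theorem map_fst_sorted (l : List (Char × Int)) :
    (PySem.List.sorted l (fun p => p.1)).map (fun p => p.1)
      = PySem.List.sorted (l.map (fun p => p.1)) (fun x => x) := by
  simp only [PySem.List.sorted, if_neg (by decide : ¬ (false = true))]
  have h : ∀ acc : List (Char × Int),
      (List.foldl (fun acc x => PySem.List.insertBy
          (fun a b => decide ((fun p : Char × Int => p.1) a < (fun p : Char × Int => p.1) b)) x acc) acc l).map (fun p => p.1)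
        = List.foldl (fun acc x => PySem.List.insertBy
            (fun a b => decide ((fun x : Char => x) a < (fun x : Char => x) b)) x acc)
            (acc.map (fun p => p.1)) (l.map (fun p => p.1)) := by
    induction l with
    | nil => intro acc; rfl
    | cons p l ih =>
      intro acc
      simp only [List.foldl_cons, List.map_cons]
      rw [insertBy_map (fun p : Char × Int => p.1)
        (fun a b => decide (a.1 < b.1)) (fun a b => decide (a < b)) (fun a a' => rfl) p acc]
      exact ih _
  simpa using h []

-- bucketing by tag over a nodup tag list is a permutation of the original list
theorem perm_flatMap_sorted_filter (ns : List Int) (l : List (Char × Int))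
    (hnd : ns.Nodup) (hmem : ∀ p ∈ l, p.2 ∈ ns) :
    (ns.flatMap (fun n =>
        PySem.List.sorted (l.filter (fun p => p.2 == n)) (fun p => p.1))).Perm l := by
  induction ns generalizing l with
  | nil =>
    have : l = [] := by
      cases l with
      | nil => rfl
      | cons p l => exact absurd (hmem p (by simp)) (by simp)
    simp [this]
  | cons n ns ih =>
    simp only [List.flatMap_cons]
    have hrw : ns.flatMap (fun m =>
          PySem.List.sorted (l.filter (fun p => p.2 == m)) (fun p => p.1))
        = ns.flatMap (fun m =>
            PySem.List.sorted ((l.filter (fun p => !(p.2 == n))).filter (fun p => p.2 == m)) (fun p => p.1)) := by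
      apply List.flatMap_congr
      intro m hm
      congr 1
      rw [List.filter_filter]
      apply (List.filter_congr ?_).symm
      intro p _
      by_cases hp : p.2 = m
      · have hmn : ¬ m = n := fun hmn => (List.nodup_cons.mp hnd).1 (by rwa [← hmn])
        have hpn : ¬ p.2 = n := by rw [hp]; exact hmn
        simp [hp, hmn]
      · simp [hp]
    rw [hrw]
    have h1 : (PySem.List.sorted (l.filter (fun p => p.2 == n)) (fun p => p.1)).Perm
        (l.filter (fun p => p.2 == n)) := PySem.List.sorted_perm _ _ _
    have h2 : (ns.flatMap (fun m =>
        PySem.List.sorted ((l.filter (fun p => !(p.2 == n))).filter (fun p => p.2 == m)) (fun p => p.1))).Perm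
        (l.filter (fun p => !(p.2 == n))) := by
      refine ih _ (List.nodup_cons.mp hnd).2 ?_
      intro p hp
      have hp' := List.of_mem_filter hp
      have := hmem p (List.mem_of_mem_filter hp)
      simp only [List.mem_cons] at this
      rcases this with h | h
      · exact absurd (by simpa using h) (by simpa using hp')
      · exact h
    exact ((h1.append h2).trans (List.filter_append_perm _ l))

-- the bucket concatenation is strictly decreasing in count and strictly increasing in letter inside a bucket
theorem pairwise_flatMap_sorted_filter (W : Int) (l : List (Char × Int))
    (hfst : l.Pairwise (fun a b => a.1 ≠ b.1)) :
    ((PySem.List.pyRange W 0 (-1)).flatMap (fun n =>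
        PySem.List.sorted (l.filter (fun p => p.2 == n)) (fun p => p.1))).Pairwise
      (fun a b => (toLex (-a.2, a.1) : Lex (Int × Char)) < toLex (-b.2, b.1)) := by
  rw [List.flatMap_def, List.pairwise_flatten]
  constructor
  · intro bucket hb
    simp only [List.mem_map] at hb
    obtain ⟨n, _, rfl⟩ := hb
    have hle : (PySem.List.sorted (l.filter (fun p => p.2 == n)) (fun p => p.1)).Pairwise
        (fun a b => a.1 ≤ b.1) := PySem.List.sorted_pairwise _ _
    have hne : (PySem.List.sorted (l.filter (fun p => p.2 == n)) (fun p => p.1)).Pairwise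
        (fun a b => a.1 ≠ b.1) := by
      rw [(PySem.List.sorted_perm (l.filter (fun p => p.2 == n)) (fun p => p.1) false).pairwise_iff
        (fun h => Ne.symm h)]
      exact hfst.filter _
    refine (hle.and hne).imp_of_mem ?_
    intro a b ha hb hab
    have ha2 : a.2 = n := by
      have := List.of_mem_filter ((PySem.List.mem_sorted _ _ _ _).mp ha)
      simpa using this
    have hb2 : b.2 = n := by
      have := List.of_mem_filter ((PySem.List.mem_sorted _ _ _ _).mp hb)
      simpa using this
    rw [Prod.Lex.toLex_lt_toLex]
    right
    exact ⟨by rw [ha2, hb2], lt_of_le_of_ne hab.1 hab.2⟩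
  · rw [List.pairwise_map]
    have hgt : (PySem.List.pyRange W 0 (-1)).Pairwise (fun a b => b < a) := by
      rw [PySem.List.pyRange_neg_one]
      rw [List.pairwise_map]
      refine List.pairwise_lt_range.imp ?_
      intro a b h
      omega
    refine hgt.imp_of_mem ?_
    intro n m _ _ hnm x hx y hy
    have hx2 : x.2 = n := by
      have := List.of_mem_filter ((PySem.List.mem_sorted _ _ _ _).mp hx)
      simpa using this
    have hy2 : y.2 = m := by
      have := List.of_mem_filter ((PySem.List.mem_sorted _ _ _ _).mp hy)
      simpa using this
    rw [Prod.Lex.toLex_lt_toLex]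
    left
    omega

-- ===== VERDICT (by name: the statement is the Claim_ definition above) =====
theorem sort_initials_spec : Claim_equal_sort_initials := by
  intro text _
  unfold Spec_sort_initials sort_initials sort_initials_alt
  rw [foldA_eq, foldB_eq, PySem.Dict.foldl_insert_getD_add_one_eq_counter]
  set ws := PySem.Chars.split₀ text.toList with hws
  set F := ws.filterMap (fun w => w.head?.map PySem.Chars.lowerChar) with hF
  set items := (PySem.Dict.counter F).items with hitems
  set W : Int := (ws.length : Int) with hW
  rw [sorted2_eq_sorted_toLex]
  have hkey : (fun a : Char × Int => (toLex (-a.2, a.1) : Lex (Int × Char)))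
      = fun a : Char × Int => (toLex ((fun x : Char × Int => -x.2) a, (fun x : Char × Int => x.1) a) : Lex (Int × Char)) := rfl
  have hfst : items.Pairwise (fun a b => a.1 ≠ b.1) := by
    rw [hitems, PySem.Dict.items_counter, List.pairwise_map]
    exact (PySem.Set.nodup_ofList F)
  have hmem : ∀ p ∈ items, p.2 ∈ PySem.List.pyRange W 0 (-1) := by
    intro p hp
    rw [hitems, PySem.Dict.items_counter, List.mem_map] at hp
    obtain ⟨k, hk, rfl⟩ := hp
    rw [PySem.List.mem_pyRange_neg_one]
    have hk' : k ∈ F := (PySem.Set.mem_ofList F k).mp hk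
    have h1 : 0 < F.count k := List.count_pos_iff.mpr hk'
    have h2 : F.count k ≤ F.length := List.count_le_length
    have h3 : F.length ≤ ws.length := List.length_filterMap_le _ _
    constructor
    · simpa using h1
    · simp only [hW]
      omega
  have hnd : (PySem.List.pyRange W 0 (-1)).Nodup := by
    rw [PySem.List.pyRange_neg_one]
    refine List.Nodup.map ?_ (List.nodup_range)
    intro a b h
    have h' : W - (a : Int) = W - (b : Int) := h
    omega
  have hperm := perm_flatMap_sorted_filter (PySem.List.pyRange W 0 (-1)) items hnd hmem
  have hpw := pairwise_flatMap_sorted_filter W items hfst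
  have hsorted := PySem.List.sorted_eq_of_perm_of_pairwise_lt items
      ((PySem.List.pyRange W 0 (-1)).flatMap (fun n =>
        PySem.List.sorted (items.filter (fun p => p.2 == n)) (fun p => p.1)))
      (fun a : Char × Int => (toLex (-a.2, a.1) : Lex (Int × Char))) hperm hpw
  rw [hkey] at hsorted
  rw [hsorted]
  rw [PySem.List.foldl_append_eq_flatMap, List.nil_append, List.map_flatMap]
  congr 1
  apply List.flatMap_congr
  intro n _
  exact map_fst_sorted _
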